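-- pv_equiv track=rewrite | github.com/sd80250/langreader | langreader/app/corpus.py | convert_to_base_27
-- ===== SOURCE A (Python) =====
-- def convert_to_base_27(string, total_length):
--     if (len(string) > total_length):
--         raise Exception('the total_length of the string should be bigger than the length of the string')
--     real_string = string
--     real_string += ' ' * (total_length - len(string))
--     total = 0
--     for letter in real_string:
--         total *= 27
--         total += letter_value(letter)
--     return total
--
-- def letter_value(char):
--     if char not in ' abcdefghijklmnopqrstuvwxyz':
--         raise Exception('this char is not supported')
--     if char == ' ':
--         return 0
--     else:
--         return ord(char) - 96
-- ===== SOURCE B (Python) =====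
-- def convert_to_base_27(string, total_length):
--     if (len(string) > total_length):
--         raise Exception('the total_length of the string should be bigger than the length of the string')
--     total = 0
--     power = 27 ** (total_length - len(string))
--     for letter in reversed(string):
--         total += letter_value(letter) * power
--         power *= 27
--     return total
--
-- def letter_value(char):
--     if char not in ' abcdefghijklmnopqrstuvwxyz':
--         raise Exception('this char is not supported')
--     if char == ' ':
--         return 0
--     else:
--         return ord(char) - 96
-- ===== Notes on version B (the rewrite author's own statement) =====
-- stated objective: alternative
-- what changed: B never builds the padded string: it scans the original string back-to-front accumulating letter_value*power with a running power that starts at 27**(pad), instead of A's left-to-right Horner multiply-and-add over a space-padded copy.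
import Mathlib
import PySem

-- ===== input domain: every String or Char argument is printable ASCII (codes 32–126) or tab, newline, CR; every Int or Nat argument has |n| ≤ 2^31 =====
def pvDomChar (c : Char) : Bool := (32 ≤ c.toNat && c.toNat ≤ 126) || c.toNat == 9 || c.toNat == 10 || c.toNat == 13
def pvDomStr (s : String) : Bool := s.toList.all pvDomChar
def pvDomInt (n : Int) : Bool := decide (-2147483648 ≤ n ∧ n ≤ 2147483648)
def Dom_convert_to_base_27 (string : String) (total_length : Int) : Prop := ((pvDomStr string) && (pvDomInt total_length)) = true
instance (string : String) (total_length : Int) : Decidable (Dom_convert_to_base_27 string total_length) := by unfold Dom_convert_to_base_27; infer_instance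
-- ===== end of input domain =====

-- B avoids building the space-padded copy: it scans the string back-to-front with a running
-- positional power starting at 27^pad, instead of A's left-to-right Horner pass over the padded string.
-- Exceptions of A (length guard, unsupported char) are excluded by Pre_.

-- ===== PORT A =====
-- letter_value: Pre_ excludes the raising branch (char not in ' a..z'), so the port is total;
-- its value on excluded chars is irrelevant.
def letter_value (char : Char) : Int :=
  if char = ' ' then 0 else (char.toNat : Int) - 96

def convert_to_base_27 (string : String) (total_length : Int) : Int :=
  -- real_string = string + ' ' * (total_length - len(string));  negative repeat gives ''
  let real_string : List Char :=
    string.toList ++ List.replicate (total_length - (string.toList.length : Int)).toNat ' '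
  real_string.foldl (fun total letter => total * 27 + letter_value letter) 0

-- ===== PORT B =====
def convert_to_base_27_alt (string : String) (total_length : Int) : Int :=
  -- power = 27 ** (total_length - len(string)); loop over reversed(string)
  let l := string.toList
  let init : Int × Int := (0, (27 : Int) ^ (total_length - (l.length : Int)).toNat)
  (l.reverse.foldl (fun s letter => (s.1 + letter_value letter * s.2, s.2 * 27)) init).1

-- ===== PRECONDITION & SPEC =====
-- Pre_ = exactly the inputs where Python A returns: length guard passes and every char is supported.
def Pre_convert_to_base_27 (string : String) (total_length : Int) : Prop :=
  (string.toList.length : Int) ≤ total_length ∧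
  string.toList.all (fun c => c == ' ' || ('a' ≤ c && c ≤ 'z')) = true
instance (string : String) (total_length : Int) : Decidable (Pre_convert_to_base_27 string total_length) := by
  unfold Pre_convert_to_base_27; infer_instance

def pvWitness_convert_to_base_27 : String × Int := ("ab c", 6)

def Spec_convert_to_base_27 (string : String) (total_length : Int) (out : Int) : Prop := out = convert_to_base_27_alt string total_length
instance (string : String) (total_length : Int) (out : Int) : Decidable (Spec_convert_to_base_27 string total_length out) := by unfold Spec_convert_to_base_27; infer_instance

-- ===== CLAIM (what is proved, stated in full; the proofs are below) =====
def Claim_equal_convert_to_base_27 : Prop := ∀ (string : String) (total_length : Int), Dom_convert_to_base_27 string total_length → Pre_convert_to_base_27 string total_length → Spec_convert_to_base_27 string total_length (convert_to_base_27 string total_length)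

-- ===== LEMMAS AND PROOFS =====

-- polynomial value of a char list in base 27 (weights from the right)
def pvPoly : List Char → Int
  | [] => 0
  | c :: rest => letter_value c * 27 ^ rest.length + pvPoly rest

theorem pvPoly_horner (l : List Char) : ∀ a : Int,
    l.foldl (fun total letter => total * 27 + letter_value letter) a
      = a * 27 ^ l.length + pvPoly l := by
  induction l with
  | nil => intro a; simp [pvPoly]
  | cons c rest ih =>
      intro a
      simp only [List.foldl_cons, ih, pvPoly, List.length_cons]
      ring

theorem pvPoly_replicate (k : Nat) : pvPoly (List.replicate k ' ') = 0 := by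
  induction k with
  | zero => simp [pvPoly]
  | succ n ih => simp [List.replicate_succ, pvPoly, ih, letter_value]

theorem pvPoly_append_spaces (l : List Char) (k : Nat) :
    pvPoly (l ++ List.replicate k ' ') = pvPoly l * 27 ^ k := by
  induction l with
  | nil => simp [pvPoly, pvPoly_replicate]
  | cons c rest ih =>
      simp only [List.cons_append, pvPoly, ih, List.length_append, List.length_replicate]
      ring

theorem pvRev_fold (l : List Char) : ∀ t p : Int,
    l.reverse.foldl (fun s letter => (s.1 + letter_value letter * s.2, s.2 * 27)) (t, p)
      = (t + pvPoly l * p, p * 27 ^ l.length) := by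
  induction l with
  | nil => intro t p; simp [pvPoly]
  | cons c rest ih =>
      intro t p
      simp only [List.reverse_cons, List.foldl_append, List.foldl_cons, List.foldl_nil, ih,
        pvPoly, List.length_cons]
      exact Prod.ext (by ring) (by ring)

-- ===== VERDICT (by name: the statement is the Claim_ definition above) =====
theorem convert_to_base_27_spec : Claim_equal_convert_to_base_27 := by
  intro string total_length _ _
  unfold Spec_convert_to_base_27 convert_to_base_27 convert_to_base_27_alt
  simp only [pvPoly_horner, pvPoly_append_spaces, pvRev_fold]
  ring
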